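-- pv_equiv track=rewrite | github.com/tbdeveloping/TextivatesDeath | TextivateAutoPoints.py | convert_to_base36
-- ===== SOURCE A (Python) =====
-- def convert_to_base36(number):
--     chars = "0123456789abcdefghijklmnopqrstuvwxyz"
--     result = ""
--
--     while number > 0:
--         remainder = number % 36
--         result = chars[remainder] + result
--         number //= 36
--
--     return result
-- ===== SOURCE B (Python) =====
-- def convert_to_base36(number):
--     chars = "0123456789abcdefghijklmnopqrstuvwxyz"
--     if number <= 0:
--         return ""
--     k = 1
--     while 36 ** k <= number:
--         k += 1
--     return "".join(chars[(number // 36 ** i) % 36] for i in range(k - 1, -1, -1))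
-- ===== Notes on version B (the rewrite author's own statement) =====
-- stated objective: alternative
-- what changed: B first computes the digit count k by comparing number with powers of 36, then builds the string front-to-back (most significant digit first) by directly indexing chars with (number // 36**i) % 36 for i = k-1..0, instead of A's repeated-remainder loop that prepends each digit to an accumulator.
import Mathlib
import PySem

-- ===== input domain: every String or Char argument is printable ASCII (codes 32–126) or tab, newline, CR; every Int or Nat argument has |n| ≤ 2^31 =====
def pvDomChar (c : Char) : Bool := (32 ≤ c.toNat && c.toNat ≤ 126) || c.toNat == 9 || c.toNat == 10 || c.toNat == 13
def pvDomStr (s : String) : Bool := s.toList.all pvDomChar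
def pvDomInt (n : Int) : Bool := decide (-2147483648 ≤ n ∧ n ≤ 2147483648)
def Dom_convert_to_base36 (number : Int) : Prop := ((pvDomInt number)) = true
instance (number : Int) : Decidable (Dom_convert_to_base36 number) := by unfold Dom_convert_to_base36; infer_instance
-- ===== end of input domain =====

-- B replaces A's repeated-remainder loop (prepending digits to an accumulator) by
-- positional extraction: it finds the digit count k via powers of 36 and then emits
-- the digits front-to-back as chars[(number // 36**i) % 36], i = k-1..0 (alternative).

-- ===== PORT A =====
-- A's digit table ("chars" local in the Python)
def base36Chars : String := "0123456789abcdefghijklmnopqrstuvwxyz"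

-- A's while loop: state = (number, result); chars[remainder] is always in range
-- (0 ≤ number % 36 < 36), so the .getD '0' default is never taken.
def convertLoopA (number : Int) (result : String) : String :=
  if 0 < number then
    convertLoopA (PySem.Int.floordiv number 36)
      ((((PySem.Str.pyGet? base36Chars (PySem.Int.mod number 36)).getD '0') : Char).toString ++ result)
  else result
termination_by number.toNat
decreasing_by
  have h : PySem.Int.floordiv number 36 = number / 36 :=
    PySem.Int.floordiv_eq_ediv_of_pos (by omega)
  rw [h]; omega

def convert_to_base36 (number : Int) : String :=
  convertLoopA number ""

-- ===== PORT B =====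
-- B's "while 36 ** k <= number: k += 1" loop computing the digit count
def b36Len (number : Int) (k : Nat) : Nat :=
  if (36:Int) ^ k ≤ number then b36Len number (k + 1) else k
termination_by (number + 1 - (36:Int) ^ k).toNat
decreasing_by
  have h1 : (1:Int) ≤ 36 ^ k := one_le_pow₀ (by norm_num)
  omega

-- B's "".join over the generator: i runs over k-1, …, 0, all nonnegative, so Python's
-- 36 ** i is exactly 36 ^ i.toNat; chars[…] is always in range (0 ≤ … % 36 < 36),
-- so the .getD '0' default is never taken.
def convert_to_base36_alt (number : Int) : String :=
  if number ≤ 0 then ""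
  else
    String.ofList ((PySem.List.pyRange ((b36Len number 1 : Int) - 1) (-1) (-1)).map
      (fun i =>
        (PySem.Str.pyGet? base36Chars
          (PySem.Int.mod (PySem.Int.floordiv number ((36:Int) ^ i.toNat)) 36)).getD '0'))

-- ===== PRECONDITION & SPEC =====
def Spec_convert_to_base36 (number : Int) (out : String) : Prop := out = convert_to_base36_alt number
instance (number : Int) (out : String) : Decidable (Spec_convert_to_base36 number out) := by unfold Spec_convert_to_base36; infer_instance

-- ===== CLAIM (what is proved, stated in full; the proofs are below) =====
def Claim_equal_convert_to_base36 : Prop := ∀ (number : Int), Dom_convert_to_base36 number → Spec_convert_to_base36 number (convert_to_base36 number)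

-- ===== LEMMAS AND PROOFS =====

-- b36Len stops as soon as the power exceeds number
theorem b36Len_of_lt (n : Int) (k : Nat) (h : n < 36 ^ k) : b36Len n k = k := by
  rw [b36Len]; simp [not_le.mpr h]

theorem b36Len_zero_of_pos (n : Int) (h : 1 ≤ n) : b36Len n 0 = b36Len n 1 := by
  rw [b36Len]; simp [h]

-- dividing by 36 drops exactly one digit
theorem b36Len_div (n : Int) (k : Nat) : b36Len n (k + 1) = b36Len (n / 36) k + 1 := by
  have h36 : (0:Int) < 36 := by norm_num
  have hpow : (36:Int) ^ (k + 1) = 36 ^ k * 36 := pow_succ 36 k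
  by_cases h : (36:Int) ^ k ≤ n / 36
  · have h' : (36:Int) ^ (k + 1) ≤ n := by
      have hm := (Int.le_ediv_iff_mul_le h36).mp h
      omega
    rw [show b36Len n (k + 1) = b36Len n (k + 2) from by rw [b36Len]; simp [h']]
    rw [show b36Len (n / 36) k = b36Len (n / 36) (k + 1) from by rw [b36Len]; simp [h]]
    exact b36Len_div n (k + 1)
  · have h' : ¬ (36:Int) ^ (k + 1) ≤ n := by
      intro hc
      exact h ((Int.le_ediv_iff_mul_le h36).mpr (by omega))
    rw [b36Len, if_neg h', b36Len, if_neg h]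
termination_by (n + 1 - (36:Int) ^ k).toNat
decreasing_by
  have h1 : (1:Int) ≤ 36 ^ k := one_le_pow₀ (by norm_num)
  omega

-- the digit character at position j (proof-side abbreviation of B's map body)
def b36digit (n : Int) (j : Nat) : Char :=
  (PySem.Str.pyGet? base36Chars
    (PySem.Int.mod (PySem.Int.floordiv n ((36:Int) ^ j)) 36)).getD '0'

-- shifting: digit j+1 of n is digit j of n // 36
theorem b36digit_succ (n : Int) (j : Nat) : b36digit n (j + 1) = b36digit (n / 36) j := by
  unfold b36digit
  have h1 : PySem.Int.floordiv n ((36:Int) ^ (j + 1)) = n / 36 ^ (j + 1) :=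
    PySem.Int.floordiv_eq_ediv_of_pos (by positivity)
  have h2 : PySem.Int.floordiv (n / 36) ((36:Int) ^ j) = (n / 36) / 36 ^ j :=
    PySem.Int.floordiv_eq_ediv_of_pos (by positivity)
  rw [h1, h2, Int.ediv_ediv_of_nonneg (by norm_num : (0:Int) ≤ 36), ← pow_succ']

-- the descending index list [K-1, ..., 0] of B's join, in closed form
def descList (K : Nat) : List Int := PySem.List.pyRange ((K : Int) - 1) (-1) (-1)

theorem descList_eq (K : Nat) :
    descList K = (List.range K).map (fun k : Nat => (K : Int) - 1 - (k : Int)) := by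
  unfold descList
  rw [PySem.List.pyRange_neg_one,
      show ((K : Int) - 1 - (-1)).toNat = K by omega]

theorem descList_succ (K : Nat) :
    descList (K + 1) = (descList K).map (· + 1) ++ [0] := by
  rw [descList_eq, descList_eq, List.range_succ, List.map_append, List.map_map]
  congr 1
  · refine List.map_congr_left ?_
    intro j hj
    simp only [Function.comp]
    push_cast
    ring
  · simp

-- one unfolding of B on a positive input: peel off the least-significant digit
theorem alt_step (n : Int) (hn : 0 < n) :
    convert_to_base36_alt n = convert_to_base36_alt (n / 36) ++ (b36digit n 0).toString := by
  have h36 : (0:Int) < 36 := by norm_num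
  by_cases hq : n / 36 ≤ 0
  · -- n < 36 : one digit, quotient side is empty
    have hn36 : n < 36 := by
      by_contra hc
      have : (1:Int) ≤ n / 36 := (Int.le_ediv_iff_mul_le h36).mpr (by omega)
      omega
    have hK : b36Len n 1 = 1 := b36Len_of_lt n 1 (by simpa using hn36)
    rw [convert_to_base36_alt, if_neg (by omega), hK,
        convert_to_base36_alt, if_pos hq]
    have h1 : PySem.List.pyRange (((1:Nat) : Int) - 1) (-1) (-1) = [0] := by
      have h := descList_eq 1
      unfold descList at h
      simpa using h
    rw [h1]
    apply String.ext
    simp [b36digit, Char.toString]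
  · -- n ≥ 36 : digit count is (digit count of n // 36) + 1, split off index 0
    have hq1 : 1 ≤ n / 36 := by omega
    have hKdiv : b36Len n 1 = b36Len (n / 36) 1 + 1 := by
      have h0 := b36Len_div n 0
      rw [b36Len_zero_of_pos (n / 36) hq1] at h0
      exact h0
    set Kq : Nat := b36Len (n / 36) 1 with hKq
    rw [convert_to_base36_alt, if_neg (by omega),
        convert_to_base36_alt, if_neg (by omega), hKdiv]
    show String.ofList (((descList (Kq + 1)).map _))
        = String.ofList ((descList Kq).map _) ++ _
    rw [descList_succ, List.map_append, List.map_map]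
    have hmain : (descList Kq).map
        ((fun i => (PySem.Str.pyGet? base36Chars
            (PySem.Int.mod (PySem.Int.floordiv n ((36:Int) ^ i.toNat)) 36)).getD '0')
          ∘ (· + 1))
        = (descList Kq).map
          (fun i => (PySem.Str.pyGet? base36Chars
            (PySem.Int.mod (PySem.Int.floordiv (n / 36) ((36:Int) ^ i.toNat)) 36)).getD '0') := by
      refine List.map_congr_left ?_
      intro i hi
      have hmem := (PySem.List.mem_pyRange_neg_one).mp hi
      have hi0 : 0 ≤ i := by omega
      show b36digit n ((i + 1).toNat) = b36digit (n / 36) i.toNat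
      rw [show (i + 1).toNat = i.toNat + 1 by omega, b36digit_succ]
    rw [hmain]
    apply String.ext
    simp [b36digit, Char.toString]

-- loop invariant: A's loop equals B with the accumulator appended
theorem convertLoopA_eq (number : Int) (result : String) :
    convertLoopA number result = convert_to_base36_alt number ++ result := by
  induction number, result using convertLoopA.induct with
  | case1 n r h ih =>
      have hdiv : PySem.Int.floordiv n 36 = n / 36 :=
        PySem.Int.floordiv_eq_ediv_of_pos (by norm_num)
      have hdig : (((PySem.Str.pyGet? base36Chars (PySem.Int.mod n 36)).getD '0') : Char)
          = b36digit n 0 := by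
        simp [b36digit]
      rw [convertLoopA, if_pos h, ih, hdiv, hdig, alt_step n h, String.append_assoc]
  | case2 n r h =>
      rw [convertLoopA, if_neg h, convert_to_base36_alt, if_pos (by omega)]
      apply String.ext
      simp

-- ===== VERDICT (by name: the statement is the Claim_ definition above) =====
theorem convert_to_base36_spec : Claim_equal_convert_to_base36 := by
  intro number _
  unfold Spec_convert_to_base36 convert_to_base36
  rw [convertLoopA_eq]
  apply String.ext
  simp
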